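-- pv_equiv track=rewrite | github.com/hridey622/nvbpf | nvbpf_py/cli.py | _format_all_block
-- ===== SOURCE A (Python) =====
-- def _format_all_block(existing_tools: list[str]) -> str:
--     width = 4
--     chunks = [existing_tools[i : i + width] for i in range(0, len(existing_tools), width)]
--     if len(chunks) == 1:
--         return "all: " + " ".join(chunks[0])
--     lines = []
--     for idx, chunk in enumerate(chunks):
--         prefix = "all: " if idx == 0 else "     "
--         suffix = " \\" if idx != len(chunks) - 1 else ""
--         lines.append(prefix + " ".join(chunk) + suffix)
--     return "\n".join(lines)
-- ===== SOURCE B (Python) =====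
-- def _format_all_block(existing_tools: list[str]) -> str:
--     if not existing_tools:
--         return ""
--     chunks = []
--     cur = []
--     for tool in existing_tools:
--         cur.append(tool)
--         if len(cur) == 4:
--             chunks.append(cur)
--             cur = []
--     if cur:
--         chunks.append(cur)
--     return "all: " + " \\\n     ".join(" ".join(c) for c in chunks)
-- ===== Notes on version B (the rewrite author's own statement) =====
-- stated objective: alternative
-- what changed: Replaces the index-range slice comprehension plus the enumerate loop with first/last prefix/suffix branching and a final newline-join by a single accumulator pass that groups tools into chunks and one continuation-separator join that assembles the whole block (empty input guarded explicitly).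
import Mathlib
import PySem

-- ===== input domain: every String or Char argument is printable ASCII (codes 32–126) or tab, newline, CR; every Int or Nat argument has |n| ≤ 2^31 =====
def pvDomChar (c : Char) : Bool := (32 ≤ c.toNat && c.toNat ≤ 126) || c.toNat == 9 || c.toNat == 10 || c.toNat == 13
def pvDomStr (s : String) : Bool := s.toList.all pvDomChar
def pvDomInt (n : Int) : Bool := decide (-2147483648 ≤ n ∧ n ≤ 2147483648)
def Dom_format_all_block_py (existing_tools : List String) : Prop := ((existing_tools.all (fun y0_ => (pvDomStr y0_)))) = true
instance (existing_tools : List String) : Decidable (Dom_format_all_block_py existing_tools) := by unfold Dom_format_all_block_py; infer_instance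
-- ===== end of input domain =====

-- B replaces A's index-range slice chunking and its enumerate loop with prefix/suffix
-- branching by a one-pass accumulator chunker and a single continuation-separator join
-- (objective: alternative).


-- ===== PORT A =====
def format_all_block_py (existing_tools : List String) : String :=
  let width : Int := 4
  let chunks : List (List String) :=
    (PySem.List.pyRange 0 (existing_tools.length : Int) width).map
      (fun i => PySem.List.slice existing_tools (some i) (some (i + width)))
  if chunks.length == 1 then
    "all: " ++ PySem.Str.join " " (PySem.List.pyGetD chunks 0 [])
  else
    let lines : List String := (PySem.List.enumerate chunks).foldl
      (fun acc p =>
        let pre := if p.1 == 0 then "all: " else "     "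
        let suf := if p.1 != (chunks.length : Int) - 1 then " \\" else ""
        acc ++ [pre ++ PySem.Str.join " " p.2 ++ suf]) []
    PySem.Str.join "\n" lines

-- ===== PORT B =====
def format_all_block_py_alt (existing_tools : List String) : String :=
  if existing_tools.isEmpty then ""
  else
    let st := existing_tools.foldl
      (fun (st : List (List String) × List String) tool =>
        let cur := st.2 ++ [tool]
        if cur.length == 4 then (st.1 ++ [cur], ([] : List String)) else (st.1, cur))
      ([], [])
    let chunks := if st.2.isEmpty then st.1 else st.1 ++ [st.2]
    "all: " ++ PySem.Str.join " \\\n     "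
      (chunks.map (fun c => PySem.Str.join " " c))

-- ===== PRECONDITION & SPEC =====
def Spec_format_all_block_py (existing_tools : List String) (out : String) : Prop := out = format_all_block_py_alt existing_tools
instance (existing_tools : List String) (out : String) : Decidable (Spec_format_all_block_py existing_tools out) := by unfold Spec_format_all_block_py; infer_instance

-- ===== CLAIM (what is proved, stated in full; the proofs are below) =====
def Claim_equal_format_all_block_py : Prop := ∀ (existing_tools : List String), Dom_format_all_block_py existing_tools → Spec_format_all_block_py existing_tools (format_all_block_py existing_tools)

-- ===== LEMMAS AND PROOFS =====

-- pvChunk4 names the chunking both sides compute: proof-side only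
def pvChunk4 : List String → List (List String)
  | [] => []
  | x :: xs => (x :: xs).take 4 :: pvChunk4 ((x :: xs).drop 4)
termination_by xs => xs.length
decreasing_by simp

theorem pvChunk4_expand (l : List String) (hl : l ≠ []) :
    pvChunk4 l = l.take 4 :: pvChunk4 (l.drop 4) := by
  cases l with
  | nil => exact absurd rfl hl
  | cons a l => rw [pvChunk4]

-- Source B's accumulator pass produces exactly the width-4 chunking
theorem pvFoldChunks (xs : List String) (chs : List (List String)) (cur : List String)
    (h : cur.length < 4) :
    (if (xs.foldl
      (fun (st : List (List String) × List String) tool =>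
        if (st.2 ++ [tool]).length == 4 then (st.1 ++ [st.2 ++ [tool]], ([] : List String))
        else (st.1, st.2 ++ [tool]))
      (chs, cur)).2.isEmpty then
      (xs.foldl
      (fun (st : List (List String) × List String) tool =>
        if (st.2 ++ [tool]).length == 4 then (st.1 ++ [st.2 ++ [tool]], ([] : List String))
        else (st.1, st.2 ++ [tool]))
      (chs, cur)).1
     else
      (xs.foldl
      (fun (st : List (List String) × List String) tool =>
        if (st.2 ++ [tool]).length == 4 then (st.1 ++ [st.2 ++ [tool]], ([] : List String))
        else (st.1, st.2 ++ [tool]))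
      (chs, cur)).1 ++ [(xs.foldl
      (fun (st : List (List String) × List String) tool =>
        if (st.2 ++ [tool]).length == 4 then (st.1 ++ [st.2 ++ [tool]], ([] : List String))
        else (st.1, st.2 ++ [tool]))
      (chs, cur)).2]) = chs ++ pvChunk4 (cur ++ xs) := by
  induction xs generalizing chs cur with
  | nil =>
    simp only [List.foldl_nil, List.append_nil]
    cases hc : cur.isEmpty
    · have hne : cur ≠ [] := by simp at hc; exact hc
      rw [pvChunk4_expand cur hne]
      have h1 : cur.take 4 = cur := List.take_of_length_le (by omega)
      have h2 : cur.drop 4 = [] := List.drop_eq_nil_of_le (by omega)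
      simp only [hc, Bool.false_eq_true, if_false, h1, h2]
      rw [show pvChunk4 [] = [] from by rw [pvChunk4]]
    · have : cur = [] := by simpa using hc
      simp [this, pvChunk4]
  | cons x xs ih =>
    simp only [List.foldl_cons]
    by_cases h4 : (cur ++ [x]).length = 4
    · have hb : ((cur ++ [x]).length == 4) = true := by simp [h4]
      simp only [hb, if_true]
      rw [ih (chs ++ [cur ++ [x]]) [] (by norm_num)]
      simp only [List.nil_append]
      have hsplit : cur ++ x :: xs = (cur ++ [x]) ++ xs := by simp
      rw [hsplit, pvChunk4_expand ((cur ++ [x]) ++ xs) (by simp)]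
      have h1 : ((cur ++ [x]) ++ xs).take 4 = cur ++ [x] := by
        rw [List.take_append_of_le_length (by omega)]
        exact List.take_of_length_le (by omega)
      have h2 : ((cur ++ [x]) ++ xs).drop 4 = xs := by
        rw [List.drop_append_of_le_length (by omega)]
        simp [List.drop_eq_nil_of_le (by omega : (cur ++ [x]).length ≤ 4)]
      rw [h1, h2]
      simp
    · have hb : ((cur ++ [x]).length == 4) = false := by simp at h4 ⊢; omega
      simp only [hb, Bool.false_eq_true, if_false]
      rw [ih chs (cur ++ [x]) (by simp at h4 ⊢; omega)]
      simp


-- A's range-indexed chunk comprehension produces exactly B's take/drop chunking.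
theorem pvChunksRange (xs : List String) :
    (List.range ((xs.length + 3)/4)).map (fun k => (xs.drop (4*k)).take 4) = pvChunk4 xs := by
  induction hlen : xs.length using Nat.strong_induction_on generalizing xs with
  | _ n ih =>
    match xs with
    | [] =>
      rw [← hlen]; simp [pvChunk4]
    | x :: t =>
      rw [← hlen]
      have hlt : ((x :: t).drop 4).length < n := by
        simp at hlen ⊢; omega
      have h1 : ((x :: t).length + 3)/4 = (((x :: t).drop 4).length + 3)/4 + 1 := by
        simp only [List.length_cons, List.length_drop]
        rcases Nat.lt_or_ge t.length 3 with h | h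
        · interval_cases t.length <;> rfl
        · have h2 : t.length + 1 - 4 + 3 = t.length := by omega
          have h3 : t.length + 1 + 3 = t.length + 4 := by omega
          rw [h2, h3, Nat.add_div_right _ (by norm_num)]
      rw [h1, List.range_succ_eq_map, List.map_cons, List.map_map]
      rw [pvChunk4]
      refine List.cons_eq_cons.mpr ⟨by simp, ?_⟩
      rw [← ih _ hlt _ rfl]
      apply List.map_congr_left
      intro k _
      simp only [Function.comp_apply, List.drop_drop]
      congr 2
      omega

theorem pvChunksA_eq (xs : List String) :
    (PySem.List.pyRange 0 (xs.length : Int) 4).map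
      (fun i => PySem.List.slice xs (some i) (some (i + 4))) = pvChunk4 xs := by
  rw [PySem.List.pyRange_of_pos 0 (xs.length : Int) (by norm_num), List.map_map,
    ← pvChunksRange xs]
  have hcount : (if (0:Int) < (xs.length : Int) then
      (((xs.length : Int) - 0 + 4 - 1) / 4).toNat else 0) = (xs.length + 3)/4 := by
    split
    · have h0 : ((xs.length : Int) - 0 + 4 - 1) = ((xs.length + 3 : Nat) : Int) := by
        push_cast; ring
      rw [h0, show ((4:Int)) = ((4:Nat):Int) from rfl, ← Int.natCast_div, Int.toNat_natCast]
    · rename_i h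
      have h0 : xs.length = 0 := by omega
      simp [h0]
  rw [hcount]
  apply List.map_congr_left
  intro k _
  simp only [Function.comp_apply]
  have h4 : (0 + 4 * (k:Int)) = ((4*k : Nat) : Int) := by push_cast; ring
  have h8 : ((4*k : Nat) : Int) + 4 = ((4*k+4 : Nat) : Int) := by push_cast; ring
  rw [h4, h8, PySem.List.slice_natCast]
  congr 1
  omega

theorem pvStrJoin_singleton (sep p : String) : PySem.Str.join sep [p] = p := by
  apply String.toList_inj.mp
  simp [PySem.Str.toList_join, PySem.Chars.join_singleton]

theorem pvStrJoin_cons_cons (sep p q : String) (rest : List String) :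
    PySem.Str.join sep (p :: q :: rest) = p ++ sep ++ PySem.Str.join sep (q :: rest) := by
  apply String.toList_inj.mp
  simp [PySem.Str.toList_join, String.toList_append, PySem.Chars.join_cons_cons]

theorem pvSepSplit : (" \\\n     " : String).toList =
    (" \\" : String).toList ++ ("\n" : String).toList ++ ("     " : String).toList := by
  decide


-- the loop body of A at indices >= 1 (never-first; last iff the tail is empty) builds
-- exactly the tail of B's continuation-separator join
theorem pvTailJoin (cs : List (List String)) (k n : Nat) (hcs : cs ≠ [])
    (hkn : k + cs.length = n) (hk : 1 ≤ k) :
    PySem.Str.join "\n"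
      ((PySem.List.enumerate cs (k : Int)).map
        (fun p => (if p.1 == 0 then "all: " else "     ") ++ PySem.Str.join " " p.2 ++
          (if p.1 != (n : Int) - 1 then " \\" else ""))) =
    "     " ++ PySem.Str.join " \\\n     " (cs.map (fun c => PySem.Str.join " " c)) := by
  induction cs generalizing k with
  | nil => simp at hcs
  | cons c rest ih =>
    cases rest with
    | nil =>
      have hz : (((k:Int)) == 0) = false := by simp; omega
      have hl : (((k:Int)) != (n:Int) - 1) = false := by
        have h1 : k + 1 = n := by simpa using hkn
        simp; omega
      simp only [PySem.List.enumerate_cons, PySem.List.enumerate_nil, List.map_cons,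
        List.map_nil]
      simp only [hz, hl]
      rw [pvStrJoin_singleton, pvStrJoin_singleton]
      apply String.toList_inj.mp
      simp [String.toList_append]
    | cons c' rest' =>
      have hz : (((k:Int)) == 0) = false := by simp; omega
      have hl : (((k:Int)) != (n:Int) - 1) = true := by
        simp only [List.length_cons] at hkn
        simp; omega
      have hk1 : ((k + 1 : Nat) : Int) = (k:Int) + 1 := by push_cast; ring
      have hih := ih (k + 1) (by simp) (by simp only [List.length_cons] at hkn ⊢; omega)
        (by omega)
      rw [hk1] at hih
      obtain ⟨m, ms, hms⟩ : ∃ m ms,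
          (PySem.List.enumerate (c' :: rest') ((k:Int) + 1)).map
            (fun p => (if p.1 == 0 then "all: " else "     ") ++ PySem.Str.join " " p.2 ++
              (if p.1 != (n : Int) - 1 then " \\" else "")) = m :: ms := by
        simp only [PySem.List.enumerate_cons, List.map_cons]
        exact ⟨_, _, rfl⟩
      rw [PySem.List.enumerate_cons, List.map_cons, hms, pvStrJoin_cons_cons, ← hms, hih]
      rw [List.map_cons, List.map_cons, List.map_cons, pvStrJoin_cons_cons]
      simp only [hz, hl]
      apply String.toList_inj.mp
      simp only [String.toList_append, List.append_assoc, pvSepSplit]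
      simp

-- ===== VERDICT (by name: the statement is the Claim_ definition above) =====
theorem format_all_block_py_spec : Claim_equal_format_all_block_py := by
  intro xs _
  show format_all_block_py xs = format_all_block_py_alt xs
  cases xs with
  | nil => rfl
  | cons x t =>
    have hch := pvChunksA_eq (x :: t)
    have hB := pvFoldChunks (x :: t) [] [] (by norm_num)
    simp only [List.nil_append] at hB
    simp only [format_all_block_py, format_all_block_py_alt]
    rw [hch, hB]
    rw [pvChunk4]
    cases hr : pvChunk4 ((x :: t).drop 4) with
    | nil =>
      simp only [List.isEmpty_cons]
      norm_num [pvStrJoin_singleton, PySem.List.pyGetD, PySem.List.pyIdx?, PySem.List.pyGet?]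
    | cons r rs =>
      have hlen1 : ((((x :: t).take 4 :: r :: rs).length == 1)) = false := by simp
      rw [hlen1]
      simp only [List.isEmpty_cons, Bool.false_eq_true, if_false]
      rw [PySem.List.foldl_append_singleton_eq_map, List.nil_append]
      rw [PySem.List.enumerate_cons, List.map_cons]
      -- head of the loop: idx 0, not last
      have hz0 : (((0:Int)) == 0) = true := by simp
      have hl0 : (((0:Int)) != ((((x :: t).take 4 :: r :: rs).length : Int)) - 1) = true := by
        simp; omega
      obtain ⟨m, ms, hms⟩ : ∃ m ms,
          (PySem.List.enumerate (r :: rs) ((0:Int) + 1)).map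
            (fun p => (if p.1 == 0 then "all: " else "     ") ++ PySem.Str.join " " p.2 ++
              (if p.1 != ((((x :: t).take 4 :: r :: rs).length : Int)) - 1 then " \\" else "")) =
            m :: ms := by
        simp only [PySem.List.enumerate_cons, List.map_cons]
        exact ⟨_, _, rfl⟩
      rw [hms, pvStrJoin_cons_cons, ← hms]
      have htail := pvTailJoin (r :: rs) 1 ((x :: t).take 4 :: r :: rs).length (by simp)
        (by simp; omega) (by omega)
      rw [show ((1 : Nat) : Int) = (0:Int) + 1 by norm_num] at htail
      rw [htail]
      simp only [hz0, hl0, if_true]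
      rw [List.map_cons, List.map_cons, List.map_cons, pvStrJoin_cons_cons]
      apply String.toList_inj.mp
      simp only [String.toList_append, List.append_assoc, pvSepSplit]
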